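-- pv_equiv track=rewrite | github.com/pptam/pptam-tool | design/hotelreservation/parse_data_dependencies.py | find_shared_fields
-- ===== SOURCE A (Python) =====
-- from collections import defaultdict
--
-- def find_shared_fields(service_fields):
--     shared = defaultdict(set)
--     services = list(service_fields.keys())
--     for i in range(len(services)):
--         for j in range(i + 1, len(services)):
--             s1, s2 = services[i], services[j]
--             common = service_fields[s1] & service_fields[s2]
--             if common:
--                 shared[(s1, s2)] = common
--     return shared
-- ===== SOURCE B (Python) =====
-- def find_shared_fields(service_fields):
--     # Inverted index field -> service positions: only services that actually share a
--     # field are ever paired, instead of intersecting every one of the S*(S-1)/2 pairs.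
--     services = list(service_fields.keys())
--     index = {}
--     for i, s in enumerate(services):
--         for f in service_fields[s]:
--             index.setdefault(f, []).append(i)
--     shared = {}
--     for i, s1 in enumerate(services):
--         per = {}
--         for f in service_fields[s1]:
--             for j in index[f]:
--                 if i < j:
--                     per.setdefault(j, []).append(f)
--         for j in sorted(per):
--             shared[(s1, services[j])] = set(per[j])
--     return shared
-- ===== Notes on version B (the rewrite author's own statement) =====
-- stated objective: faster
-- what changed: A intersects the field sets of every one of the S*(S-1)/2 service pairs; B builds an inverted index field->service positions once and only touches pairs that actually co-occur on some field, emitting each service's partners in sorted order.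
import Mathlib
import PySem

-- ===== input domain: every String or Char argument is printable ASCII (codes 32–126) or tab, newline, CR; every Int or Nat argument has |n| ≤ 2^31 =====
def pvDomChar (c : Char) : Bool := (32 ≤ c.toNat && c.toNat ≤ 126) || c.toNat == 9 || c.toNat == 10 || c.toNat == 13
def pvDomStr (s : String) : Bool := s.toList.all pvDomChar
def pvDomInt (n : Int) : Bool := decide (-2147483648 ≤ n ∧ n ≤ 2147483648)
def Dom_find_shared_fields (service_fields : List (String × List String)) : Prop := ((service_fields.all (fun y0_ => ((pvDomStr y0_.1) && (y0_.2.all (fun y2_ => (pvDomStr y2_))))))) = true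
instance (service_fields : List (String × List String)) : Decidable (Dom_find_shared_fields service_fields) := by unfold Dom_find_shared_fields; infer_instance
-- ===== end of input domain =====

-- B replaces A's pairwise intersection of all service pairs by an inverted index
-- field → service positions, pairing only services that actually share a field (objective: faster).

-- ===== PORT A =====
def find_shared_fields (service_fields : List (String × List String)) : List (String × String × List String) :=
  let d := PySem.Dict.mk service_fields
  let services := d.keys
  let shared : PySem.Dict (String × String) (List String) :=
    (PySem.List.pyRange 0 (services.length : Int) 1).foldl (fun sh i =>
      (PySem.List.pyRange (i + 1) (services.length : Int) 1).foldl (fun sh j =>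
        let s1 := PySem.List.pyGetD services i ""
        let s2 := PySem.List.pyGetD services j ""
        let common := PySem.Set.inter (d.getD s1 []) (d.getD s2 [])
        if common ≠ [] then sh.insert (s1, s2) common else sh) sh)
      PySem.Dict.empty
  shared.items.map (fun q => (q.1.1, q.1.2, q.2))

-- ===== PORT B =====
def find_shared_fields_alt (service_fields : List (String × List String)) : List (String × String × List String) :=
  let d := PySem.Dict.mk service_fields
  let services := d.keys
  let index : PySem.Dict String (List Int) :=
    (PySem.List.enumerate services 0).foldl (fun ix p =>
      (d.getD p.2 []).foldl (fun ix f => ix.modify f [] (· ++ [p.1])) ix) PySem.Dict.empty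
  let shared : PySem.Dict (String × String) (List String) :=
    (PySem.List.enumerate services 0).foldl (fun sh p =>
      let per : PySem.Dict Int (List String) :=
        (d.getD p.2 []).foldl (fun per f =>
          (index.getD f []).foldl (fun per j =>
            if p.1 < j then per.modify j [] (· ++ [f]) else per) per) PySem.Dict.empty
      (PySem.List.sorted per.keys (fun j => j) false).foldl (fun sh j =>
        sh.insert (p.2, PySem.List.pyGetD services j "") (PySem.Set.ofList (per.getD j []))) sh)
      PySem.Dict.empty
  shared.items.map (fun q => (q.1.1, q.1.2, q.2))

-- ===== PRECONDITION & SPEC =====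
-- The argument encodes a Python dict mapping service names to SETS of fields: Pre_ states exactly
-- that representability — service names pairwise distinct and each field list duplicate-free
-- (an association list violating it denotes no Python input of A's type).
def Pre_find_shared_fields (service_fields : List (String × List String)) : Prop :=
  (service_fields.map Prod.fst).Nodup ∧ ∀ p ∈ service_fields, p.2.Nodup
instance (service_fields : List (String × List String)) : Decidable (Pre_find_shared_fields service_fields) := by unfold Pre_find_shared_fields; infer_instance

def pvWitness_find_shared_fields : (List (String × List String)) :=
  [("frontend", ["user", "hotel"]), ("search", ["hotel", "date"]), ("geo", ["lat"])]

def Spec_find_shared_fields (service_fields : List (String × List String)) (out : List (String × String × List String)) : Prop := out = find_shared_fields_alt service_fields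
instance (service_fields : List (String × List String)) (out : List (String × String × List String)) : Decidable (Spec_find_shared_fields service_fields out) := by unfold Spec_find_shared_fields; infer_instance

-- ===== CLAIM (what is proved, stated in full; the proofs are below) =====
def Claim_equal_find_shared_fields : Prop := ∀ (service_fields : List (String × List String)), Dom_find_shared_fields service_fields → Pre_find_shared_fields service_fields → Spec_find_shared_fields service_fields (find_shared_fields service_fields)

-- ===== LEMMAS AND PROOFS =====

-- Proof-only abbreviations (not used by the ports).
def pvF (sf : List (String × List String)) (s : String) : List String :=
  (PySem.Dict.mk sf).getD s []
def pvAt (sf : List (String × List String)) (i : Int) : String :=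
  PySem.List.pyGetD (PySem.Dict.mk sf).keys i ""
def pvCom (sf : List (String × List String)) (i j : Int) : List String :=
  (pvF sf (pvAt sf i)).filter (fun f => (pvF sf (pvAt sf j)).contains f)
def pvIndex (sf : List (String × List String)) : PySem.Dict String (List Int) :=
  (PySem.List.enumerate (PySem.Dict.mk sf).keys 0).foldl (fun ix p =>
    ((PySem.Dict.mk sf).getD p.2 []).foldl (fun ix f => ix.modify f [] (· ++ [p.1])) ix)
    PySem.Dict.empty
def pvPer (sf : List (String × List String)) (i : Int) (s1 : String) : PySem.Dict Int (List String) :=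
  (pvF sf s1).foldl (fun per f =>
    ((pvIndex sf).getD f []).foldl (fun per j =>
      if i < j then per.modify j [] (· ++ [f]) else per) per) PySem.Dict.empty
def pvInner (sf : List (String × List String)) (t : Nat) : List Int :=
  (PySem.List.pyRange ((t : Int) + 1) (((PySem.Dict.mk sf).keys.length : Nat) : Int) 1).filter
    (fun j => decide (pvCom sf (t : Int) j ≠ []))
def pvCanon (sf : List (String × List String)) : PySem.Dict (String × String) (List String) :=
  (List.range (PySem.Dict.mk sf).keys.length).foldl (fun sh t =>
    (pvInner sf t).foldl (fun sh j =>
      sh.insert (pvAt sf (t : Int), pvAt sf j) (pvCom sf (t : Int) j)) sh) PySem.Dict.empty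

theorem pvAt_natCast (sf : List (String × List String)) (u : Nat) :
    pvAt sf (u : Int) = (PySem.Dict.mk sf).keys.getD u "" :=
  PySem.List.pyGetD_natCast _ u ""

theorem pvF_nodup (sf : List (String × List String)) (hv : ∀ p ∈ sf, p.2.Nodup) (s : String) :
    (pvF sf s).Nodup := by
  induction sf with
  | nil => simp [pvF, PySem.Dict.getD_eq_get?_getD, PySem.Dict.get?]
  | cons p rest ih =>
    have h1 : p.2.Nodup := hv p (by simp)
    have h2 : ∀ q ∈ rest, q.2.Nodup := fun q hq => hv q (by simp [hq])
    simp only [pvF, PySem.Dict.getD_eq_get?_getD] at *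
    rw [show (PySem.Dict.mk (p :: rest)) = PySem.Dict.mk ((p.1, p.2) :: rest) by simp]
    rw [PySem.Dict.get?_mk_cons]
    split
    · simpa using h1
    · exact ih h2

theorem pv_enum_spec (xs : List String) (a : Int) :
    PySem.List.enumerate xs a = (List.range xs.length).map (fun t : Nat => (a + (t : Int), xs.getD t "")) := by
  induction xs generalizing a with
  | nil => simp [PySem.List.enumerate]
  | cons x t ih =>
    rw [show PySem.List.enumerate (x :: t) a = (a, x) :: PySem.List.enumerate t (a + 1) from rfl]
    rw [ih]
    simp only [List.length_cons, List.range_succ_eq_map, List.map_cons, List.map_map]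
    congr 1
    · simp
    · apply List.map_congr_left
      intro u hu
      simp only [Function.comp_apply, List.getD_cons_succ, Prod.mk.injEq]
      exact ⟨by push_cast; ring, trivial⟩

theorem pv_pyRange_one_eq (a b : Int) :
    PySem.List.pyRange a b 1 = (List.range (b - a).toNat).map (fun t : Nat => a + (t : Int)) := by
  unfold PySem.List.pyRange
  split
  · omega
  · split
    · split
      · simp
      · have : (b - a).toNat = 0 := by omega
        simp [this]
    · omega

theorem pv_foldl_flatMap {α β δ : Type} (l : List α) (g : α → List β) (f : δ → β → δ) (init : δ) :
    (l.flatMap g).foldl f init = l.foldl (fun acc x => (g x).foldl f acc) init := by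
  rw [List.flatMap_def, List.foldl_flatten, List.foldl_map]

theorem pv_filter_map_flatMap {α β γ : Type} (l : List α) (g : α → List β) (p : β → Bool) (h : β → γ) :
    ((l.flatMap g).filter p).map h = l.flatMap (fun x => ((g x).filter p).map h) := by
  induction l with
  | nil => simp
  | cons x t ih => simp [List.flatMap_cons, List.filter_append, ih]

theorem pv_flatMap_if_singleton {α β : Type} (l : List α) (c : α → Bool) (g : α → β) :
    l.flatMap (fun u => if c u then [g u] else []) = (l.filter c).map g := by
  induction l with
  | nil => simp
  | cons x t ih =>
    simp only [List.flatMap_cons, List.filter_cons, ih]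
    split <;> simp

theorem pvIndex_getD (sf : List (String × List String)) (hv : ∀ p ∈ sf, p.2.Nodup) (f : String) :
    (pvIndex sf).getD f [] =
      ((List.range (PySem.Dict.mk sf).keys.length).filter
        (fun u => (pvF sf ((PySem.Dict.mk sf).keys.getD u "")).contains f)).map (fun u : Nat => (u : Int)) := by
  have h1 : pvIndex sf =
      ((PySem.List.enumerate (PySem.Dict.mk sf).keys 0).flatMap
        (fun p => (pvF sf p.2).map (fun g => (g, p.1)))).foldl
        (fun d q => d.modify q.1 [] (· ++ [q.2])) PySem.Dict.empty := by
    rw [pv_foldl_flatMap]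
    unfold pvIndex
    apply PySem.List.foldl_congr_mem
    intro acc p _
    rw [List.foldl_map]
    rfl
  rw [h1, PySem.Dict.getD_foldl_modify_append, PySem.Dict.getD_empty, List.nil_append]
  rw [pv_enum_spec, List.flatMap_map, pv_filter_map_flatMap]
  have h2 : ∀ t : Nat, t ∈ List.range (PySem.Dict.mk sf).keys.length →
      ((((pvF sf ((PySem.Dict.mk sf).keys.getD t "")).map
          (fun g => (g, ((0 : Int) + (t : Int))))).filter (fun q => q.1 == f)).map (fun q => q.2)) =
      (if (pvF sf ((PySem.Dict.mk sf).keys.getD t "")).contains f then [(t : Int)] else []) := by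
    intro t _
    set fs := pvF sf ((PySem.Dict.mk sf).keys.getD t "") with hfs
    rw [List.filter_map, List.map_map]
    have hc : (fun q => q.1 == f) ∘ (fun g => (g, (0 : Int) + (t : Int))) = fun g => g == f := rfl
    rw [hc, List.filter_beq]
    have hnd := pvF_nodup sf hv ((PySem.Dict.mk sf).keys.getD t "")
    by_cases hm : f ∈ fs
    · have : fs.count f = 1 :=
        le_antisymm (List.nodup_iff_count_le_one.mp hnd f) (List.count_pos_iff.mpr hm)
      simp [this, hm]
    · have : fs.count f = 0 := List.count_eq_zero.mpr hm
      simp [this, hm]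
  calc ((List.range (PySem.Dict.mk sf).keys.length).flatMap fun t =>
          ((((pvF sf ((PySem.Dict.mk sf).keys.getD t "")).map
            (fun g => (g, (0 : Int) + (t : Int)))).filter (fun q => q.1 == f)).map (fun q => q.2)))
      = (List.range (PySem.Dict.mk sf).keys.length).flatMap
          (fun t => if (pvF sf ((PySem.Dict.mk sf).keys.getD t "")).contains f then [(t : Int)] else []) := by
        exact List.flatMap_congr h2
    _ = _ := by rw [pv_flatMap_if_singleton]

theorem pvIndex_mem (sf : List (String × List String)) (hv : ∀ p ∈ sf, p.2.Nodup)
    (f : String) (j : Int) :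
    j ∈ (pvIndex sf).getD f [] ↔
      0 ≤ j ∧ j < ((PySem.Dict.mk sf).keys.length : Int) ∧ f ∈ pvF sf (pvAt sf j) := by
  rw [pvIndex_getD sf hv f]
  simp only [List.mem_map, List.mem_filter, List.mem_range]
  constructor
  · rintro ⟨u, ⟨hu, hc⟩, rfl⟩
    refine ⟨by positivity, by exact_mod_cast hu, ?_⟩
    rw [pvAt_natCast]
    exact List.contains_iff_mem.mp hc
  · rintro ⟨h0, hn, hf⟩
    refine ⟨j.toNat, ⟨by omega, ?_⟩, by omega⟩
    rw [List.contains_iff_mem, ← pvAt_natCast]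
    have : ((j.toNat : Nat) : Int) = j := by omega
    rw [this]
    exact hf

theorem pvIndex_getD_nodup (sf : List (String × List String)) (hv : ∀ p ∈ sf, p.2.Nodup) (f : String) :
    ((pvIndex sf).getD f []).Nodup := by
  rw [pvIndex_getD sf hv f]
  refine List.Nodup.map (fun a b h => by exact_mod_cast h) (List.Nodup.filter _ List.nodup_range)

theorem pv_innerFold (js : List Int) (hnd : js.Nodup) (i j : Int) (f : String)
    (per : PySem.Dict Int (List String)) :
    (js.foldl (fun per j' => if i < j' then per.modify j' [] (· ++ [f]) else per) per).getD j []
      = per.getD j [] ++ (if i < j ∧ j ∈ js then [f] else []) := by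
  induction js generalizing per with
  | nil => simp
  | cons j' rest ih =>
    simp only [List.nodup_cons] at hnd
    rw [List.foldl_cons, ih hnd.2]
    by_cases hj : j = j'
    · subst hj
      have hnr : j ∉ rest := hnd.1
      by_cases hij : i < j
      · rw [if_pos hij, PySem.Dict.getD_modify]
        simp [hij, hnr]
      · rw [if_neg hij]
        simp [hij]
    · by_cases hij' : i < j'
      · rw [if_pos hij', PySem.Dict.getD_modify]
        simp only [if_neg hj]
        by_cases hij : i < j
        · simp [hij, List.mem_cons, Ne.symm, hj]
        · simp [hij]
      · rw [if_neg hij']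
        simp [List.mem_cons, hj]

theorem pvPer_getD (sf : List (String × List String)) (hv : ∀ p ∈ sf, p.2.Nodup)
    (i : Int) (s1 : String) (j : Int) :
    (pvPer sf i s1).getD j [] =
      if i < j then (pvF sf s1).filter (fun f => ((pvIndex sf).getD f []).contains j) else [] := by
  suffices h : ∀ (fs : List String) (per : PySem.Dict Int (List String)),
      (fs.foldl (fun per f =>
        ((pvIndex sf).getD f []).foldl (fun per j' =>
          if i < j' then per.modify j' [] (· ++ [f]) else per) per) per).getD j []
      = per.getD j [] ++ (if i < j then fs.filter (fun f => ((pvIndex sf).getD f []).contains j) else []) by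
    rw [pvPer, h]
    simp
  intro fs
  induction fs with
  | nil => simp
  | cons f rest ih =>
    intro per
    rw [List.foldl_cons, ih, pv_innerFold _ (pvIndex_getD_nodup sf hv f), List.append_assoc]
    congr 1
    by_cases hij : i < j
    · simp only [List.filter_cons, true_and, hij]
      by_cases hm : j ∈ (pvIndex sf).getD f []
      · simp [hm]
      · simp [hm]
    · simp [hij]

theorem pvPer_keys (sf : List (String × List String)) (i : Int) (s1 : String) :
    (pvPer sf i s1).keys =
      PySem.Set.ofList ((pvF sf s1).flatMap (fun f => ((pvIndex sf).getD f []).filter (fun j => decide (i < j)))) := by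
  suffices h : ∀ (fs : List String) (per : PySem.Dict Int (List String)),
      (fs.foldl (fun per f =>
        ((pvIndex sf).getD f []).foldl (fun per j' =>
          if i < j' then per.modify j' [] (· ++ [f]) else per) per) per).keys
      = PySem.Set.update per.keys (fs.flatMap (fun f => ((pvIndex sf).getD f []).filter (fun j => decide (i < j)))) by
    rw [pvPer, h]
    rfl
  intro fs
  induction fs with
  | nil => intro per; rfl
  | cons f rest ih =>
    intro per
    rw [List.foldl_cons, ih, List.flatMap_cons]
    rw [show PySem.Set.update per.keys (((pvIndex sf).getD f []).filter (fun j => decide (i < j)) ++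
          rest.flatMap (fun f => ((pvIndex sf).getD f []).filter (fun j => decide (i < j))))
        = PySem.Set.update (PySem.Set.update per.keys (((pvIndex sf).getD f []).filter (fun j => decide (i < j))))
            (rest.flatMap (fun f => ((pvIndex sf).getD f []).filter (fun j => decide (i < j))))
        from List.foldl_append ..]
    congr 1
    rw [PySem.List.foldl_ite_eq_foldl_filter (fun j' => i < j')
      (fun (per : PySem.Dict Int (List String)) j' => per.modify j' [] (· ++ [f]))]
    simpa using PySem.Dict.keys_foldl_modify_key
      (List.filter (fun x => decide (i < x)) ((pvIndex sf).getD f [])) (fun j' => j') []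
      (fun _ _ v => v ++ [f]) per

theorem pvInner_pairwise (sf : List (String × List String)) (t : Nat) :
    List.Pairwise (fun a b : Int => a < b) (pvInner sf t) := by
  apply List.Pairwise.sublist List.filter_sublist
  rw [pv_pyRange_one_eq, List.pairwise_map]
  exact List.pairwise_lt_range.imp (fun h => by omega)

theorem pvInner_mem (sf : List (String × List String)) (t : Nat) (j : Int) :
    j ∈ pvInner sf t ↔
      ((t : Int) < j ∧ j < ((PySem.Dict.mk sf).keys.length : Int)) ∧ pvCom sf (t : Int) j ≠ [] := by
  simp only [pvInner, List.mem_filter, PySem.List.mem_pyRange_one, decide_eq_true_eq]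
  constructor
  · rintro ⟨⟨h1, h2⟩, h3⟩; exact ⟨⟨by omega, h2⟩, h3⟩
  · rintro ⟨⟨h1, h2⟩, h3⟩; exact ⟨⟨by omega, h2⟩, h3⟩

theorem pvMainA (sf : List (String × List String)) :
    find_shared_fields sf = (pvCanon sf).items.map (fun q => (q.1.1, q.1.2, q.2)) := by
  simp only [find_shared_fields, pvCanon]
  congr 1
  congr 1
  rw [PySem.List.pyRange_zero_natCast, List.foldl_map]
  apply PySem.List.foldl_congr_mem
  intro acc t _
  exact PySem.List.foldl_ite_eq_foldl_filter (fun j => pvCom sf (t : Int) j ≠ [])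
    (fun (sh : PySem.Dict (String × String) (List String)) j =>
      sh.insert (pvAt sf (t : Int), pvAt sf j) (pvCom sf (t : Int) j)) _ acc

theorem pvMainB (sf : List (String × List String)) (hv : ∀ p ∈ sf, p.2.Nodup) :
    find_shared_fields_alt sf = (pvCanon sf).items.map (fun q => (q.1.1, q.1.2, q.2)) := by
  simp only [find_shared_fields_alt, pvCanon]
  congr 1
  congr 1
  show ((PySem.List.enumerate (PySem.Dict.mk sf).keys 0).foldl (fun sh p =>
      (PySem.List.sorted (pvPer sf p.1 p.2).keys (fun j => j) false).foldl (fun sh j =>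
        sh.insert (p.2, PySem.List.pyGetD (PySem.Dict.mk sf).keys j "")
          (PySem.Set.ofList ((pvPer sf p.1 p.2).getD j []))) sh) PySem.Dict.empty)
    = (List.range (PySem.Dict.mk sf).keys.length).foldl (fun sh t =>
        (pvInner sf t).foldl (fun sh j =>
          sh.insert (pvAt sf (t : Int), pvAt sf j) (pvCom sf (t : Int) j)) sh) PySem.Dict.empty
  rw [pv_enum_spec, List.foldl_map]
  apply PySem.List.foldl_congr_mem
  intro acc t ht
  rw [List.mem_range] at ht
  show (PySem.List.sorted (pvPer sf (0 + (t : Int)) ((PySem.Dict.mk sf).keys.getD t "")).keys (fun j => j) false).foldl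
      (fun sh j => sh.insert ((PySem.Dict.mk sf).keys.getD t "", PySem.List.pyGetD (PySem.Dict.mk sf).keys j "")
        (PySem.Set.ofList ((pvPer sf (0 + (t : Int)) ((PySem.Dict.mk sf).keys.getD t "")).getD j []))) acc
    = (pvInner sf t).foldl (fun sh j =>
        sh.insert (pvAt sf (t : Int), pvAt sf j) (pvCom sf (t : Int) j)) acc
  rw [show (0 + (t : Int)) = (t : Int) from by ring]
  have hInnerNodup : (pvInner sf t).Nodup := (pvInner_pairwise sf t).imp ne_of_lt
  have hKeysNodup : (pvPer sf (t : Int) ((PySem.Dict.mk sf).keys.getD t "")).keys.Nodup := by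
    rw [pvPer_keys]
    exact PySem.Set.nodup_ofList _
  have hMem : ∀ j : Int, j ∈ (pvPer sf (t : Int) ((PySem.Dict.mk sf).keys.getD t "")).keys ↔ j ∈ pvInner sf t := by
    intro j
    rw [pvPer_keys, PySem.Set.mem_ofList, List.mem_flatMap, pvInner_mem]
    constructor
    · rintro ⟨f, hf, hjf⟩
      rw [List.mem_filter, decide_eq_true_eq] at hjf
      obtain ⟨hidx, htj⟩ := hjf
      rw [pvIndex_mem sf hv] at hidx
      obtain ⟨h0, hn, hfj⟩ := hidx
      refine ⟨⟨htj, hn⟩, ?_⟩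
      rw [pvCom, Ne, List.filter_eq_nil_iff]
      push Not
      refine ⟨f, ?_, ?_⟩
      · rw [pvAt_natCast]; exact hf
      · simp [hfj]
    · rintro ⟨⟨htj, hn⟩, hcom⟩
      rw [pvCom, Ne, List.filter_eq_nil_iff] at hcom
      push Not at hcom
      obtain ⟨f, hf, hfc⟩ := hcom
      refine ⟨f, by rwa [pvAt_natCast] at hf, ?_⟩
      rw [List.mem_filter, decide_eq_true_eq]
      refine ⟨?_, htj⟩
      rw [pvIndex_mem sf hv]
      exact ⟨by omega, hn, List.contains_iff_mem.mp (by simpa using hfc)⟩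
  have hKey : PySem.List.sorted (pvPer sf (t : Int) ((PySem.Dict.mk sf).keys.getD t "")).keys (fun j => j) false = pvInner sf t := by
    apply PySem.List.sorted_eq_of_perm_of_pairwise_lt
    · exact (List.perm_ext_iff_of_nodup hInnerNodup hKeysNodup).mpr (fun j => (hMem j).symm)
    · exact pvInner_pairwise sf t
  rw [hKey]
  apply PySem.List.foldl_congr_mem
  intro acc' j hj
  have hj' := (pvInner_mem sf t j).mp hj
  obtain ⟨⟨htj, hn⟩, _⟩ := hj'
  congr 1
  · rw [pvAt_natCast]; rfl
  · rw [pvPer_getD sf hv, if_pos htj]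
    have hfc : (pvF sf ((PySem.Dict.mk sf).keys.getD t "")).filter
        (fun f => ((pvIndex sf).getD f []).contains j)
      = (pvF sf (pvAt sf (t : Int))).filter (fun f => (pvF sf (pvAt sf j)).contains f) := by
      rw [pvAt_natCast]
      apply List.filter_congr
      intro f _
      rw [Bool.eq_iff_iff, List.contains_iff_mem, List.contains_iff_mem, pvIndex_mem sf hv]
      constructor
      · rintro ⟨_, _, hm⟩; exact hm
      · intro hm; exact ⟨by omega, hn, hm⟩
    rw [hfc]
    exact PySem.Set.ofList_eq_self_of_nodup _ ((pvF_nodup sf hv _).filter _)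

-- ===== VERDICT (by name: the statement is the Claim_ definition above) =====
theorem find_shared_fields_spec : Claim_equal_find_shared_fields := by
  intro sf _hDom hPre
  unfold Spec_find_shared_fields
  rw [pvMainA sf, pvMainB sf hPre.2]
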